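-- pv_equiv track=rewrite | github.com/pypi-data/pypi-mirror-176 | packages/robotframework-dictkeyallpaths/robotframework-dictkeyallpaths-0.2.15.tar.gz/robotframework-dictkeyallpaths-0.2.15/DictAllPaths/getDictAllPaths.py | __setFormatRobotPath
-- ===== SOURCE A (Python) =====
-- def __setFormatRobotPath(keyPath):
--     keyPath=keyPath.replace("[",",[")
--     pathList=keyPath.split(",")
--     robotDictPath=""
--     for item in pathList:
--         if (item.find("[") == -1):  # If it not List
--             robotDictPath=robotDictPath + "['" + item + "']"
--         else:
--             robotDictPath=robotDictPath + item
--     robotDictPath=robotDictPath.replace("['']","")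
--     return robotDictPath
-- ===== SOURCE B (Python) =====
-- def __setFormatRobotPath(keyPath):
--     # Single left-to-right character scan with a name buffer and a verbatim flag,
--     # instead of replace-then-split-then-rejoin.
--     out = ""
--     buf = ""
--     verbatim = False
--     for ch in keyPath:
--         if ch == '[':
--             out += buf if verbatim else "['" + buf + "']"
--             buf = "["
--             verbatim = True
--         elif ch == ',':
--             out += buf if verbatim else "['" + buf + "']"
--             buf = ""
--             verbatim = False
--         else:
--             buf += ch
--     out += buf if verbatim else "['" + buf + "']"
--     return out.replace("['']", "")
-- ===== Notes on version B (the rewrite author's own statement) =====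
-- stated objective: alternative
-- what changed: B scans the input once left to right with a name buffer and a verbatim flag, flushing the buffer at each bracket-open or comma character, instead of A's pipeline of a global replace, a split on commas and a per-item substring search; the final strip of empty-key wrappers is kept.
import Mathlib
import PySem

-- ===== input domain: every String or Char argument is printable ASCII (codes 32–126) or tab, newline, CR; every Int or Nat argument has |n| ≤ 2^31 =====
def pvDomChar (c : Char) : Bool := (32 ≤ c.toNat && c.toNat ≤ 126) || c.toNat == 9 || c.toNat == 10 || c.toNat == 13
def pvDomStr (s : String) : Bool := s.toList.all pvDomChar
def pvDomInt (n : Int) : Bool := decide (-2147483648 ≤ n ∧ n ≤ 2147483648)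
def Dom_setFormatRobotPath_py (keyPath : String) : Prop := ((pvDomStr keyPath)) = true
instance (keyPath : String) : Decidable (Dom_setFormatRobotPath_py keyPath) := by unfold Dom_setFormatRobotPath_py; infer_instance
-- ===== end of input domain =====

-- B re-decomposes A as one character scan (name buffer + verbatim flag) instead of
-- replace/split/per-item-find; same cost, different structure.

-- ===== PORT A =====
-- Literal transliteration of A: insert a comma before every bracket-open, split on commas,
-- fold wrapping bracket-free items as quoted keys and copying bracket items verbatim,
-- then strip empty-key wrappers.
def setFormatRobotPath_py (keyPath : String) : String :=
  let s := PySem.Chars.replace keyPath.toList ['['] [',', '[']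
  let pathList := PySem.Chars.splitOn s [',']
  let robot := pathList.foldl
    (fun acc item =>
      if PySem.Chars.find item ['['] = -1 then
        acc ++ ['[', '\''] ++ item ++ ['\'', ']']
      else
        acc ++ item) []
  String.ofList (PySem.Chars.replace robot ['[', '\'', '\'', ']'] [])

-- ===== PORT B =====
-- flush: emit the buffer verbatim if it is a bracket group, else wrapped as ['buf']
def pvFlush (buf : List Char) (verb : Bool) : List Char :=
  if verb then buf else ['[', '\''] ++ buf ++ ['\'', ']']

def setFormatRobotPath_py_alt (keyPath : String) : String :=
  let st := keyPath.toList.foldl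
    (fun (st : List Char × List Char × Bool) ch =>
      if ch = '[' then (st.1 ++ pvFlush st.2.1 st.2.2, ['['], true)
      else if ch = ',' then (st.1 ++ pvFlush st.2.1 st.2.2, [], false)
      else (st.1, st.2.1 ++ [ch], st.2.2)) (([], [], false) : List Char × List Char × Bool)
  String.ofList (PySem.Chars.replace (st.1 ++ pvFlush st.2.1 st.2.2) ['[', '\'', '\'', ']'] [])

-- ===== PRECONDITION & SPEC =====
def Spec_setFormatRobotPath_py (keyPath : String) (out : String) : Prop := out = setFormatRobotPath_py_alt keyPath
instance (keyPath : String) (out : String) : Decidable (Spec_setFormatRobotPath_py keyPath out) := by unfold Spec_setFormatRobotPath_py; infer_instance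

-- ===== CLAIM (what is proved, stated in full; the proofs are below) =====
def Claim_equal_setFormatRobotPath_py : Prop := ∀ (keyPath : String), Dom_setFormatRobotPath_py keyPath → Spec_setFormatRobotPath_py keyPath (setFormatRobotPath_py keyPath)

-- ===== LEMMAS AND PROOFS =====

-- reference form of A's first replace ("[" -> ",[")
def repC : List Char → List Char
  | [] => []
  | c :: t => if c = '[' then ',' :: '[' :: repC t else c :: repC t

-- reference form of split on ','
def splitC : List Char → List (List Char)
  | [] => [[]]
  | c :: t => if c = ',' then [] :: splitC t else (splitC t).modifyHead (c :: ·)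

-- what A's loop body appends for one item
def wrapA (item : List Char) : List Char :=
  if PySem.Chars.find item ['['] = -1 then ['[', '\''] ++ item ++ ['\'', ']'] else item

theorem replace_go_repC (l : List Char) : ∀ (fuel : Nat) (acc : List Char),
    l.length ≤ fuel →
    PySem.Chars.replace.go ['['] [',', '['] fuel l acc = acc.reverse ++ repC l := by
  induction l with
  | nil =>
    intro fuel acc _
    cases fuel <;> simp [PySem.Chars.replace.go, repC]
  | cons c t ih =>
    intro fuel acc h
    cases fuel with
    | zero => simp at h
    | succ f =>
      by_cases hc : c = '['
      · subst hc
        have : List.isPrefixOf ['['] ('[' :: t) = true := by simp [List.isPrefixOf]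
        simp [PySem.Chars.replace.go, this, repC, ih f _ (by simpa using h)]
      · have : List.isPrefixOf ['['] (c :: t) = false := by
          simp [List.isPrefixOf]; exact fun h' => hc h'.symm
        simp [PySem.Chars.replace.go, this, repC, hc, ih f _ (by simpa using h)]

theorem splitOn_go_splitC (l : List Char) : ∀ (fuel : Nat) (cur : List Char) (acc : List (List Char)),
    l.length < fuel →
    PySem.Chars.splitOn.go [','] fuel l cur acc
      = acc.reverse ++ (splitC l).modifyHead (cur.reverse ++ ·) := by
  induction l with
  | nil =>
    intro fuel cur acc h
    cases fuel with
    | zero => simp at h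
    | succ f => simp [PySem.Chars.splitOn.go, splitC]
  | cons c t ih =>
    intro fuel cur acc h
    cases fuel with
    | zero => simp at h
    | succ f =>
      by_cases hc : c = ','
      · subst hc
        have hp : List.isPrefixOf [','] (',' :: t) = true := by simp [List.isPrefixOf]
        have := ih f [] (cur.reverse :: acc) (by simpa using h)
        simp [PySem.Chars.splitOn.go, hp, splitC, this]
        cases splitC t <;> simp
      · have hp : List.isPrefixOf [','] (c :: t) = false := by
          simp [List.isPrefixOf]; exact fun h' => hc h'.symm
        have := ih f (c :: cur) acc (by simpa using h)
        simp only [PySem.Chars.splitOn.go, hp, Bool.false_eq_true, if_false, this, splitC, hc]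
        cases splitC t with
        | nil => simp
        | cons hd tl => simp

theorem modifyHead_idfun {α : Type} (l : List α) : l.modifyHead (fun x => x) = l := by
  cases l <;> simp

theorem modifyHead_modifyHead {α : Type} (l : List α) (f g : α → α) :
    (l.modifyHead f).modifyHead g = l.modifyHead (fun x => g (f x)) := by
  cases l <;> simp

theorem foldl_wrapA (items : List (List Char)) : ∀ (acc : List Char),
    items.foldl
      (fun acc item =>
        if PySem.Chars.find item ['['] = -1 then
          acc ++ ['[', '\''] ++ item ++ ['\'', ']']
        else
          acc ++ item) acc
      = acc ++ items.flatMap wrapA := by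
  induction items with
  | nil => intro acc; simp
  | cons hd tl ih =>
    intro acc
    rw [List.foldl_cons]
    by_cases h : PySem.Chars.find hd ['['] = -1
    · rw [if_pos h, ih]
      simp [wrapA, h, List.append_assoc]
    · rw [if_neg h, ih]
      simp [wrapA, h, List.append_assoc]

theorem singleton_infix_iff (a : Char) (l : List Char) : [a] <:+: l ↔ a ∈ l := by
  constructor
  · intro h
    exact h.mem (by simp)
  · intro h
    obtain ⟨p, q, hpq⟩ := List.append_of_mem h
    exact ⟨p, q, by simp [hpq]⟩

theorem wrapA_of_flag (buf : List Char) (verb : Bool) (hv : verb = true ↔ '[' ∈ buf) :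
    wrapA buf = pvFlush buf verb := by
  unfold wrapA pvFlush
  by_cases hm : '[' ∈ buf
  · have hinf : ['['] <:+: buf := (singleton_infix_iff _ _).2 hm
    have : PySem.Chars.find buf ['['] ≠ -1 := (PySem.Chars.find_ne_neg_one_iff _ _).2 hinf
    simp [this, hv.2 hm]
  · have : PySem.Chars.find buf ['['] = -1 :=
      (PySem.Chars.find_eq_neg_one_iff _ _).2 (fun h => hm ((singleton_infix_iff _ _).1 h))
    have hvf : verb = false := by
      cases verb
      · rfl
      · exact absurd (hv.1 rfl) hm
    simp [this, hvf]

theorem B_main (s : List Char) : ∀ (out buf : List Char) (verb : Bool),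
    (verb = true ↔ '[' ∈ buf) →
    (let st := s.foldl
        (fun (st : List Char × List Char × Bool) ch =>
          if ch = '[' then (st.1 ++ pvFlush st.2.1 st.2.2, ['['], true)
          else if ch = ',' then (st.1 ++ pvFlush st.2.1 st.2.2, [], false)
          else (st.1, st.2.1 ++ [ch], st.2.2)) ((out, buf, verb));
      st.1 ++ pvFlush st.2.1 st.2.2)
      = out ++ ((splitC (repC s)).modifyHead (buf ++ ·)).flatMap wrapA := by
  induction s with
  | nil =>
    intro out buf verb hv
    simp [repC, splitC, wrapA_of_flag buf verb hv]
  | cons c t ih =>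
    intro out buf verb hv
    simp only [List.foldl_cons]
    by_cases hc : c = '['
    · subst hc
      rw [if_pos rfl]
      have hstep := ih (out ++ pvFlush buf verb) ['['] true (by simp)
      simp only at hstep
      rw [hstep]
      simp [repC, splitC, wrapA_of_flag buf verb hv, List.flatMap_cons, List.append_assoc]
    · rw [if_neg hc]
      by_cases hcc : c = ','
      · subst hcc
        rw [if_pos rfl]
        have hstep := ih (out ++ pvFlush buf verb) [] false (by simp)
        simp only at hstep
        rw [hstep]
        simp [repC, splitC, hc, wrapA_of_flag buf verb hv, List.flatMap_cons,
          List.append_assoc, modifyHead_idfun]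
      · rw [if_neg hcc]
        have hv' : verb = true ↔ '[' ∈ buf ++ [c] := by
          rw [List.mem_append, List.mem_singleton]
          constructor
          · intro h; exact Or.inl (hv.1 h)
          · rintro (h | h)
            · exact hv.2 h
            · exact absurd h.symm hc
        have hstep := ih out (buf ++ [c]) verb hv'
        simp only at hstep
        rw [hstep]
        have hfun : (fun x => (buf ++ [c]) ++ x) = ((buf ++ ·) ∘ (c :: ·)) := by
          funext x; simp
        simp only [repC, splitC, if_neg hc, if_neg hcc, modifyHead_modifyHead]
        rw [hfun]
        rfl

theorem A_main (s : List Char) :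
    (PySem.Chars.splitOn (PySem.Chars.replace s ['['] [',', '[']) [',']).foldl
      (fun acc item =>
        if PySem.Chars.find item ['['] = -1 then
          acc ++ ['[', '\''] ++ item ++ ['\'', ']']
        else
          acc ++ item) []
      = (splitC (repC s)).flatMap wrapA := by
  have hrep : PySem.Chars.replace s ['['] [',', '['] = repC s := by
    unfold PySem.Chars.replace
    simpa using replace_go_repC s s.length [] le_rfl
  have hsplit : PySem.Chars.splitOn (repC s) [','] = splitC (repC s) := by
    unfold PySem.Chars.splitOn
    have := splitOn_go_splitC (repC s) ((repC s).length + 1) [] [] (by omega)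
    simpa [modifyHead_idfun] using this
  rw [hrep, hsplit, foldl_wrapA]
  simp

-- ===== VERDICT (by name: the statement is the Claim_ definition above) =====
theorem setFormatRobotPath_py_spec : Claim_equal_setFormatRobotPath_py := by
  intro keyPath _
  unfold Spec_setFormatRobotPath_py
  have hB := B_main keyPath.toList [] [] false (by simp)
  simp only [List.nil_append, modifyHead_idfun] at hB
  simp only [setFormatRobotPath_py, setFormatRobotPath_py_alt]
  rw [A_main keyPath.toList]
  rw [hB]
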